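-- pv_equiv track=rewrite | github.com/kevin-brown/degree | detect.py | touch_area_from_visited
-- ===== SOURCE A (Python) =====
-- def touch_area_from_visited(visited_list):
--     if not visited_list:
--         return None
--
--     area_x1 = visited_list[0][0]
--     area_y1 = visited_list[0][1]
--
--     area_x2 = visited_list[0][0]
--     area_y2 = visited_list[0][1]
--
--     for x, y in visited_list:
--         if x < area_x1:
--             area_x1 = x
--
--         if y < area_y1:
--             area_y1 = y
--
--         if x > area_x2:
--             area_x2 = x
--
--         if y > area_y2:
--             area_y2 = y
--
--     return (area_x1, area_y1, area_x2, area_y2)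
-- ===== SOURCE B (Python) =====
-- def touch_area_from_visited(visited_list):
--     if not visited_list:
--         return None
--
--     xs = [x for x, y in visited_list]
--     ys = [y for x, y in visited_list]
--
--     return (min(xs), min(ys), max(xs), max(ys))
-- ===== Notes on version B (the rewrite author's own statement) =====
-- stated objective: simpler
-- what changed: Replaces the single fused min/max-tracking loop with manual comparisons by projecting the x- and y-coordinate lists once and delegating the four extrema to the built-in min/max over each list.
import Mathlib
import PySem

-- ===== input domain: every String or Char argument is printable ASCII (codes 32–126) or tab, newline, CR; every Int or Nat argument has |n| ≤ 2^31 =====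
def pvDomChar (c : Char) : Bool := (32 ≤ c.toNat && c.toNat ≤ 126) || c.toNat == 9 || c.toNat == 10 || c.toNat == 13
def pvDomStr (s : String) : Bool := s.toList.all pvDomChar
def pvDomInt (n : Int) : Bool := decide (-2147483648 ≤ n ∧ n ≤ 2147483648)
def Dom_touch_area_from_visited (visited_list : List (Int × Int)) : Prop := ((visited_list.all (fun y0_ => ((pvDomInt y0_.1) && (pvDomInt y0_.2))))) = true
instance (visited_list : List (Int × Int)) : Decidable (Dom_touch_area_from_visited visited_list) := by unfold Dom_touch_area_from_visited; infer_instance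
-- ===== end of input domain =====

-- B is a simpler decomposition: project the coordinate lists and use built-in min/max (four scans) instead of A's fused comparison loop; same O(n) cost.

-- ===== PORT A =====
-- one fused loop keeping the running (x1, y1, x2, y2), seeded from the first point
def touch_area_from_visited (visited_list : List (Int × Int)) : Option (Int × Int × Int × Int) :=
  match visited_list with
  | [] => none
  | (x0, y0) :: _ =>
    some (visited_list.foldl
      (fun s p =>
        (if p.1 < s.1 then p.1 else s.1,
         if p.2 < s.2.1 then p.2 else s.2.1,
         if p.1 > s.2.2.1 then p.1 else s.2.2.1,
         if p.2 > s.2.2.2 then p.2 else s.2.2.2))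
      (x0, y0, x0, y0))

-- ===== PORT B =====
-- xs/ys comprehensions, then min(xs), min(ys), max(xs), max(ys) via PySem.List.min?/max?
def touch_area_from_visited_alt (visited_list : List (Int × Int)) : Option (Int × Int × Int × Int) :=
  match visited_list with
  | [] => none
  | _ =>
    let xs := visited_list.map (fun p => p.1)
    let ys := visited_list.map (fun p => p.2)
    match PySem.List.min? xs (fun v => v), PySem.List.min? ys (fun v => v),
          PySem.List.max? xs (fun v => v), PySem.List.max? ys (fun v => v) with
    | some a, some b, some c, some d => some (a, b, c, d)
    | _, _, _, _ => none  -- unreachable: the lists are nonempty here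

-- ===== PRECONDITION & SPEC =====
def Spec_touch_area_from_visited (visited_list : List (Int × Int)) (out : Option (Int × Int × Int × Int)) : Prop := out = touch_area_from_visited_alt visited_list
instance (visited_list : List (Int × Int)) (out : Option (Int × Int × Int × Int)) : Decidable (Spec_touch_area_from_visited visited_list out) := by unfold Spec_touch_area_from_visited; infer_instance

-- ===== CLAIM (what is proved, stated in full; the proofs are below) =====
def Claim_equal_touch_area_from_visited : Prop := ∀ (visited_list : List (Int × Int)), Dom_touch_area_from_visited visited_list → Spec_touch_area_from_visited visited_list (touch_area_from_visited visited_list)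

-- ===== LEMMAS AND PROOFS =====

-- A's fused loop computes the four independent running min/max folds
theorem bbox_foldl (l : List (Int × Int)) :
    ∀ (a b c d : Int),
    l.foldl
      (fun s p =>
        (if p.1 < s.1 then p.1 else s.1,
         if p.2 < s.2.1 then p.2 else s.2.1,
         if p.1 > s.2.2.1 then p.1 else s.2.2.1,
         if p.2 > s.2.2.2 then p.2 else s.2.2.2))
      (a, b, c, d)
    = ((l.map (fun p => p.1)).foldl min a,
       (l.map (fun p => p.2)).foldl min b,
       (l.map (fun p => p.1)).foldl max c,
       (l.map (fun p => p.2)).foldl max d) := by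
  induction l with
  | nil => intro a b c d; simp
  | cons p t ih =>
    intro a b c d
    have h1 : (if p.1 < a then p.1 else a) = min a p.1 := by rw [min_def]; split_ifs <;> omega
    have h2 : (if p.2 < b then p.2 else b) = min b p.2 := by rw [min_def]; split_ifs <;> omega
    have h3 : (if p.1 > c then p.1 else c) = max c p.1 := by rw [max_def]; split_ifs <;> omega
    have h4 : (if p.2 > d then p.2 else d) = max d p.2 := by rw [max_def]; split_ifs <;> omega
    simp only [List.foldl_cons, List.map_cons, ih, h1, h2, h3, h4]

theorem touch_area_from_visited_spec : Claim_equal_touch_area_from_visited := by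
  intro l _
  unfold Spec_touch_area_from_visited touch_area_from_visited touch_area_from_visited_alt
  match l with
  | [] => rfl
  | (x0, y0) :: t =>
    simp only [List.map_cons, PySem.List.min?_id_cons, PySem.List.max?_id_cons,
      bbox_foldl, List.foldl_cons, lt_self_iff_false, gt_iff_lt, if_false]
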